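-- pv_equiv track=rewrite | github.com/OriBraverman/Deep-learning-methods-for-texts-and-sequences | assignment 2/Part 1/utils.py | convert_words_to_window
-- ===== SOURCE A (Python) =====
-- def convert_words_to_window(words, tags, window_size=5):
--     """
--     @param words: a list of lists of words in the sentences
--     @param tags: a list of lists of tags in the sentences
--     @param window_size: the size of the window to use
--     @return: a list of tuples that return the full vector of window_size*emb_size and the actual tag
--     """
--     vector_out = []
--     tag_out = []
--     padding = (window_size - 1) // 2
--
--     for sentence, sentence_tag in zip(words, tags):
--         # Apply padding
--         padded_sentence = ['<PAD_START>'] * padding + sentence + ['<PAD_END>'] * padding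
--
--         for i in range(padding, len(padded_sentence) - padding):
--             # Extract the window
--             window = padded_sentence[i - padding: i + padding + 1]
--             vector_out.append(window)
--             tag_out.append(sentence_tag[i - padding])  # Adjust index for original sentence
--
--     return vector_out, tag_out
-- ===== SOURCE B (Python) =====
-- def convert_words_to_window(words, tags, window_size=5):
--     padding = (window_size - 1) // 2
--     windows = [[sentence[k] if 0 <= k < len(sentence) else
--                 ('<PAD_START>' if k < 0 else '<PAD_END>')
--                 for k in range(j - padding, j + padding + 1)]
--                for sentence, _ in zip(words, tags)
--                for j in range(len(sentence))]
--     labels = [tag for sentence, sentence_tag in zip(words, tags)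
--               for tag in sentence_tag[:len(sentence)]]
--     return windows, labels
-- ===== Notes on version B (the rewrite author's own statement) =====
-- stated objective: simpler
-- what changed: B is two declarative comprehension passes with no accumulators, no padded copy and no slicing of the sentence: the windows list maps each position to PAD markers or words by index comparison, and the labels list is built separately by flattening each tag list truncated to its sentence length.
-- outside the precondition, e.g. on convert_words_to_window([], [], 0): A returns ([], []), B returns ([], [])
import Mathlib
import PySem

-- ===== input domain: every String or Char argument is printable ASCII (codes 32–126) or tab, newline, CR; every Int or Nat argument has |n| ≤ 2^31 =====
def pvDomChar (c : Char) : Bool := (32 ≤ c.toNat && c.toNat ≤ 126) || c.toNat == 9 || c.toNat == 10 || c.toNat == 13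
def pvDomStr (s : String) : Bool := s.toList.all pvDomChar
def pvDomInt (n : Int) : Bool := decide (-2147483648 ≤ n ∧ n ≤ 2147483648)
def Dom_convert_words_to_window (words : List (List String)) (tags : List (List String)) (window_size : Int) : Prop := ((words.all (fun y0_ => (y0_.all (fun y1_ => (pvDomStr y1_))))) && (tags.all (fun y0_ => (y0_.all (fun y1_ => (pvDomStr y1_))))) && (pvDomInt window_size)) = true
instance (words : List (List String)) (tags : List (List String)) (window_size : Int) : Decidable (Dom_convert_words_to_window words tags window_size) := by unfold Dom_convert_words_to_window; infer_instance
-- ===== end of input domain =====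

-- B replaces A's accumulator loops, padded sentence copy and slicing by two declarative
-- comprehension passes: windows by mapping offsets to PAD markers / words via index comparison,
-- labels by flattening each tag list truncated to its sentence's length.

-- ===== PORT A =====
def convert_words_to_window (words : List (List String)) (tags : List (List String)) (window_size : Int) : List (List String) × List String :=
  let padding := PySem.Int.floordiv (window_size - 1) 2
  (words.zip tags).foldl
    (fun acc st =>
      -- padded_sentence = ['<PAD_START>'] * padding + sentence + ['<PAD_END>'] * padding
      let padded := List.replicate padding.toNat "<PAD_START>" ++ st.1 ++ List.replicate padding.toNat "<PAD_END>"
      (PySem.List.pyRange padding ((padded.length : Int) - padding) 1).foldl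
        (fun acc i =>
          (acc.1 ++ [PySem.List.slice padded (some (i - padding)) (some (i + padding + 1))],
           acc.2 ++ [PySem.List.pyGetD st.2 (i - padding) ""]))
        acc)
    ([], [])

-- ===== PORT B =====
def convert_words_to_window_alt (words : List (List String)) (tags : List (List String)) (window_size : Int) : List (List String) × List String :=
  let padding := PySem.Int.floordiv (window_size - 1) 2
  ((words.zip tags).flatMap (fun st =>
      (PySem.List.pyRange 0 (st.1.length : Int) 1).map (fun j =>
        (PySem.List.pyRange (j - padding) (j + padding + 1) 1).map
          (fun k => if 0 ≤ k ∧ k < (st.1.length : Int) then PySem.List.pyGetD st.1 k ""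
                    else if k < 0 then "<PAD_START>" else "<PAD_END>"))),
   (words.zip tags).flatMap (fun st => PySem.List.slice st.2 none (some (st.1.length : Int))))

-- ===== PRECONDITION & SPEC =====
-- Pre_ restricts to the natural domain window_size ≥ 1 (for window_size ≤ 0 the Python A raises
-- IndexError whenever there is at least one sentence; with no zipped sentences A and B agree, see the cited example)
-- and requires each zipped tag list to be at least as long as its sentence (else A raises IndexError).
def Pre_convert_words_to_window (words : List (List String)) (tags : List (List String)) (window_size : Int) : Prop :=
  1 ≤ window_size ∧ ∀ st ∈ words.zip tags, st.1.length ≤ st.2.length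
instance (words : List (List String)) (tags : List (List String)) (window_size : Int) : Decidable (Pre_convert_words_to_window words tags window_size) := by unfold Pre_convert_words_to_window; infer_instance
def pvWitness_convert_words_to_window : List (List String) × List (List String) × Int := ([["a", "b"]], [["X", "Y"]], 3)

def Spec_convert_words_to_window (words : List (List String)) (tags : List (List String)) (window_size : Int) (out : List (List String) × List String) : Prop := out = convert_words_to_window_alt words tags window_size
instance (words : List (List String)) (tags : List (List String)) (window_size : Int) (out : List (List String) × List String) : Decidable (Spec_convert_words_to_window words tags window_size out) := by unfold Spec_convert_words_to_window; infer_instance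

-- ===== CLAIM =====
def Claim_equal_convert_words_to_window : Prop := ∀ (words : List (List String)) (tags : List (List String)) (window_size : Int), Dom_convert_words_to_window words tags window_size → Pre_convert_words_to_window words tags window_size → Spec_convert_words_to_window words tags window_size (convert_words_to_window words tags window_size)

-- ===== LEMMAS AND PROOFS =====

-- One window of A (a slice of the padded sentence at position k) equals one window of B
-- (offset range mapped through B's index-comparison function), for k inside the sentence.
lemma pv_win_eq (s : List String) (p k : Nat) (hk : k < s.length) :
    PySem.List.slice (List.replicate p "<PAD_START>" ++ s ++ List.replicate p "<PAD_END>")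
        (some (k : Int)) (some ((k : Int) + (p : Int) + (p : Int) + 1))
    = (PySem.List.pyRange ((k : Int) - (p : Int)) ((k : Int) + (p : Int) + 1) 1).map
        (fun q => if 0 ≤ q ∧ q < (s.length : Int) then PySem.List.pyGetD s q ""
                  else if q < 0 then "<PAD_START>" else "<PAD_END>") := by
  rw [PySem.List.slice_toNat _ (by omega) (by omega), PySem.List.pyRange_one]
  rw [show ((k : Int) + p + p + 1).toNat - (k : Int).toNat = p + p + 1 from by omega]
  rw [show ((k : Int) + p + 1 - ((k : Int) - p)).toNat = p + p + 1 from by omega]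
  rw [List.map_map]
  apply List.ext_getElem
  · simp
    omega
  · intro i h1 h2
    simp only [List.getElem_take, List.getElem_drop, List.getElem_map, List.getElem_range,
      Function.comp_apply]
    simp only [List.length_take, List.length_drop, List.length_append,
      List.length_replicate] at h1
    have hi : i < p + p + 1 := by omega
    have hkt : (k : Int).toNat = k := by omega
    simp only [hkt]
    by_cases hlo : k + i < p
    · rw [List.getElem_append_left (by simp; omega), List.getElem_append_left (by simp; omega),
        List.getElem_replicate]
      rw [if_neg (by omega), if_pos (by omega)]
    · by_cases hhi : k + i < p + s.length
      · rw [List.getElem_append_left (by simp; omega),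
          List.getElem_append_right (by simp; omega)]
        rw [if_pos (by constructor <;> omega)]
        rw [PySem.List.pyGetD_eq_getElem _ _ (by omega) (by omega)]
        simp only [List.length_replicate]
        congr 1
        omega
      · rw [List.getElem_append_right (by simp; omega), List.getElem_replicate]
        rw [if_neg (by omega), if_neg (by omega)]

-- A's per-sentence tag extraction equals taking the first n tags.
lemma pv_tags_eq (t : List String) (n : Nat) (h : n ≤ t.length) :
    (List.range n).map (fun k : Nat => PySem.List.pyGetD t (k : Int) "") = t.take n := by
  apply List.ext_getElem
  · simp; omega
  · intro i h1 h2
    simp only [List.getElem_map, List.getElem_range, List.getElem_take]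
    simp only [List.length_map, List.length_range] at h1
    rw [PySem.List.pyGetD_eq_getElem _ _ (by omega) (by omega)]
    congr 1

-- A's per-sentence window list (in reindexed, mapped form).
def pvWA (p : Nat) (st : List String × List String) : List (List String) :=
  (PySem.List.pyRange (p : Int) (((List.replicate p "<PAD_START>" ++ st.1 ++ List.replicate p "<PAD_END>").length : Int) - (p : Int)) 1).map
    (fun i => PySem.List.slice (List.replicate p "<PAD_START>" ++ st.1 ++ List.replicate p "<PAD_END>") (some (i - (p : Int))) (some (i + (p : Int) + 1)))

def pvTA (p : Nat) (st : List String × List String) : List String :=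
  (PySem.List.pyRange (p : Int) (((List.replicate p "<PAD_START>" ++ st.1 ++ List.replicate p "<PAD_END>").length : Int) - (p : Int)) 1).map
    (fun i => PySem.List.pyGetD st.2 (i - (p : Int)) "")

-- A's inner loop, as a simultaneous append of the two per-sentence lists.
lemma pv_stepA (p : Nat) (acc : List (List String) × List String) (st : List String × List String) :
    (PySem.List.pyRange (p : Int) (((List.replicate p "<PAD_START>" ++ st.1 ++ List.replicate p "<PAD_END>").length : Int) - (p : Int)) 1).foldl
      (fun acc i =>
        (acc.1 ++ [PySem.List.slice (List.replicate p "<PAD_START>" ++ st.1 ++ List.replicate p "<PAD_END>") (some (i - (p : Int))) (some (i + (p : Int) + 1))],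
         acc.2 ++ [PySem.List.pyGetD st.2 (i - (p : Int)) ""]))
      acc
    = (acc.1 ++ pvWA p st, acc.2 ++ pvTA p st) := by
  obtain ⟨a, b⟩ := acc
  rw [PySem.List.foldl_prod_mk (f := fun a i =>
        a ++ [PySem.List.slice (List.replicate p "<PAD_START>" ++ st.1 ++ List.replicate p "<PAD_END>") (some (i - (p : Int))) (some (i + (p : Int) + 1))])
      (g := fun b i => b ++ [PySem.List.pyGetD st.2 (i - (p : Int)) ""])]
  rw [PySem.List.foldl_append_singleton_eq_map, PySem.List.foldl_append_singleton_eq_map]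
  rfl

-- The reindexing shared by both per-sentence lists of A.
lemma pv_rangeA (p : Nat) (s : List String) :
    PySem.List.pyRange (p : Int) (((List.replicate p "<PAD_START>" ++ s ++ List.replicate p "<PAD_END>").length : Int) - (p : Int)) 1
      = (List.range s.length).map (fun k : Nat => (p : Int) + (k : Int)) := by
  rw [PySem.List.pyRange_one]
  congr 1
  simp

-- A's per-sentence window list equals B's.
lemma pv_WA_eq (p : Nat) (st : List String × List String) :
    pvWA p st
      = (PySem.List.pyRange 0 (st.1.length : Int) 1).map (fun j =>
          (PySem.List.pyRange (j - (p : Int)) (j + (p : Int) + 1) 1).map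
            (fun k => if 0 ≤ k ∧ k < (st.1.length : Int) then PySem.List.pyGetD st.1 k ""
                      else if k < 0 then "<PAD_START>" else "<PAD_END>")) := by
  unfold pvWA
  rw [pv_rangeA, PySem.List.pyRange_one 0 (st.1.length : Int),
      show ((st.1.length : Int) - 0).toNat = st.1.length from by omega,
      List.map_map, List.map_map]
  apply List.map_congr_left
  intro k hk
  simp only [Function.comp_apply]
  rw [show ((p : Int) + k - p) = (k : Int) from by omega,
      show ((p : Int) + k + p + 1) = ((k : Int) + p + p + 1) from by omega,
      show ((0 : Int) + k - p) = ((k : Int) - p) from by omega,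
      show ((0 : Int) + k + p + 1) = ((k : Int) + p + 1) from by omega]
  exact pv_win_eq st.1 p k (List.mem_range.mp hk)

-- A's per-sentence tag list equals B's (the tag list truncated to the sentence length).
lemma pv_TA_eq (p : Nat) (st : List String × List String) (h : st.1.length ≤ st.2.length) :
    pvTA p st = PySem.List.slice st.2 none (some (st.1.length : Int)) := by
  unfold pvTA
  rw [pv_rangeA, List.map_map, PySem.List.slice_to_natCast]
  rw [← pv_tags_eq st.2 st.1.length h]
  apply List.map_congr_left
  intro k _
  simp only [Function.comp_apply]
  rw [show ((p : Int) + k - p) = (k : Int) from by omega]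

-- ===== VERDICT (by name: the statement is the Claim_ definition above) =====
theorem convert_words_to_window_spec : Claim_equal_convert_words_to_window := by
  intro words tags window_size _ hpre
  unfold Spec_convert_words_to_window convert_words_to_window convert_words_to_window_alt
  simp only
  obtain ⟨hws, htags⟩ := hpre
  have hp : 0 ≤ PySem.Int.floordiv (window_size - 1) 2 := by
    have := PySem.Int.floordiv_mul_add_mod (window_size - 1) 2
    have h1 := PySem.Int.mod_nonneg (window_size - 1) (b := 2) (by omega)
    have h2 := PySem.Int.mod_lt (window_size - 1) (b := 2) (by omega)
    omega
  obtain ⟨p, hpe⟩ : ∃ p : Nat, PySem.Int.floordiv (window_size - 1) 2 = (p : Int) :=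
    ⟨_, (Int.toNat_of_nonneg hp).symm⟩
  rw [hpe]
  simp only [Int.toNat_natCast]
  have h1 := PySem.List.foldl_congr_mem (words.zip tags) _
      (fun (acc : List (List String) × List String) st => (acc.1 ++ pvWA p st, acc.2 ++ pvTA p st))
      ([], []) (fun acc st _ => pv_stepA p acc st)
  rw [h1]
  rw [PySem.List.foldl_prod_mk (f := fun a st => a ++ pvWA p st) (g := fun b st => b ++ pvTA p st)]
  rw [PySem.List.foldl_append_eq_flatMap, PySem.List.foldl_append_eq_flatMap]
  simp only [List.nil_append]
  rw [Prod.mk.injEq]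
  constructor
  · rw [List.flatMap_def, List.flatMap_def]
    exact congrArg List.flatten (List.map_congr_left (fun st _ => pv_WA_eq p st))
  · rw [List.flatMap_def, List.flatMap_def]
    exact congrArg List.flatten (List.map_congr_left (fun st hst => pv_TA_eq p st (htags st hst)))
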